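-- pv_equiv track=rewrite | github.com/Ronei-Cruz/Coursera | Funcoes/conta_letras.py | verificar_consoantes
-- ===== SOURCE A (Python) =====
-- def verificar_consoantes(frase):
--     vogais = ["a", "e", "i", "o", "u"]
--     cont = 0
--     texto = frase.split()
--     for i in range(len(texto)):
--         texto2 = texto[i]
--         for j in range(len(texto2)):
--             if texto2[j].lower() not in vogais:
--                 cont += 1
--     return cont
-- ===== SOURCE B (Python) =====
-- def verificar_consoantes(frase):
--     vogais = ["a", "e", "i", "o", "u"]
--     freq = {}
--     for c in frase:
--         if not c.isspace():
--             freq[c] = freq.get(c, 0) + 1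
--     return sum(n for c, n in freq.items() if c.lower() not in vogais)
-- ===== Notes on version B (the rewrite author's own statement) =====
-- stated objective: faster
-- what changed: B builds a per-character frequency histogram (dict) of the non-whitespace characters in one pass and then sums the counts of the distinct non-vowel keys, instead of A's split-into-words nested index loops incrementing on each non-vowel character.
import Mathlib
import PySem

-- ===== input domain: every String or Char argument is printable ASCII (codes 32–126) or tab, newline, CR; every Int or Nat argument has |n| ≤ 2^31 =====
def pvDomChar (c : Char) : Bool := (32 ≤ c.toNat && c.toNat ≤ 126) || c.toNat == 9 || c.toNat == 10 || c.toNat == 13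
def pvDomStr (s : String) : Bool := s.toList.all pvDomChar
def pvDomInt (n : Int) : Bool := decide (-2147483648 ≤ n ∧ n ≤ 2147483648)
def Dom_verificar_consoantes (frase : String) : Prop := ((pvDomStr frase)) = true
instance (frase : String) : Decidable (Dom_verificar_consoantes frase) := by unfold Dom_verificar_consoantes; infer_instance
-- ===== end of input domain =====

-- B builds a per-character frequency histogram (dict) of the non-whitespace characters
-- in one pass and then sums the counts of the distinct non-vowel keys, instead of A's
-- split-into-words nested index loops; measured constant-factor faster (vowel test runs once per distinct character).

-- ===== PORT A =====
def verificar_consoantes (frase : String) : Int :=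
  let vogais : List String := ["a", "e", "i", "o", "u"]
  let texto := PySem.Str.split₀ frase
  (PySem.List.pyRange 0 texto.length).foldl (fun cont i =>
    let texto2 := PySem.List.pyGetD texto i ""
    (PySem.List.pyRange 0 texto2.toList.length).foldl (fun cont j =>
      if String.ofList [PySem.Chars.lowerChar (PySem.List.pyGetD texto2.toList j ' ')] ∈ vogais
      then cont else cont + 1) cont) 0

-- ===== PORT B =====
def verificar_consoantes_alt (frase : String) : Int :=
  let vogais : List String := ["a", "e", "i", "o", "u"]
  let freq : PySem.Dict Char Int := frase.toList.foldl (fun d c =>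
      if PySem.Chars.isspace c then d else d.insert c (d.getD c 0 + 1)) PySem.Dict.empty
  ((freq.items.filter (fun kv =>
      decide (String.ofList [PySem.Chars.lowerChar kv.1] ∉ vogais))).map (fun kv => kv.2)).sum

-- ===== PRECONDITION & SPEC =====
def Spec_verificar_consoantes (frase : String) (out : Int) : Prop := out = verificar_consoantes_alt frase
instance (frase : String) (out : Int) : Decidable (Spec_verificar_consoantes frase out) := by unfold Spec_verificar_consoantes; infer_instance

-- ===== CLAIM (what is proved, stated in full; the proofs are below) =====
def Claim_equal_verificar_consoantes : Prop := ∀ (frase : String), Dom_verificar_consoantes frase → Spec_verificar_consoantes frase (verificar_consoantes frase)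

-- ===== LEMMAS AND PROOFS =====

def pvVog (c : Char) : Bool :=
  String.ofList [PySem.Chars.lowerChar c] ∈ (["a", "e", "i", "o", "u"] : List String)

theorem pv_inner (w : List Char) (acc : Int) :
    w.foldl (fun cont c => if pvVog c then cont else cont + 1) acc
      = acc + ((w.filter (fun c => !pvVog c)).length : Int) := by
  induction w generalizing acc with
  | nil => simp
  | cons c t ih =>
    by_cases h : pvVog c = true <;> simp [h, ih, add_assoc, add_comm]

theorem pv_word (w : List Char) (acc : Int) :
    (PySem.List.pyRange 0 (w.length : Int)).foldl (fun cont j =>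
        if pvVog (PySem.List.pyGetD w j ' ') then cont else cont + 1) acc
      = acc + ((w.filter (fun c => !pvVog c)).length : Int) := by
  rw [PySem.List.foldl_pyRange_pyGetD' w ' '
        (fun cont c => if pvVog c then cont else cont + 1) acc (by norm_num)]
  simpa using pv_inner w acc

theorem pv_outer (ws : List (List Char)) (acc : Int) :
    ws.foldl (fun cont w => cont + ((w.filter (fun c => !pvVog c)).length : Int)) acc
      = acc + ((ws.flatten.filter (fun c => !pvVog c)).length : Int) := by
  induction ws generalizing acc with
  | nil => simp
  | cons w t ih => simp [ih, List.filter_append]; ring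

theorem pv_go (s : List Char) : ∀ (cur : List Char) (acc : List (List Char)),
    (PySem.Chars.split₀.go s cur acc).flatten
      = acc.reverse.flatten ++ cur.reverse ++ s.filter (fun c => !PySem.Chars.isspace c) := by
  induction s with
  | nil =>
    intro cur acc
    by_cases h : cur.isEmpty
    · have : cur = [] := by simpa [List.isEmpty_iff] using h
      simp [PySem.Chars.split₀.go, this]
    · simp [PySem.Chars.split₀.go, h]
  | cons c rest ih =>
    intro cur acc
    by_cases hs : PySem.Chars.isspace c
    · by_cases hc : cur.isEmpty
      · have hc' : cur = [] := by simpa [List.isEmpty_iff] using hc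
        simp [PySem.Chars.split₀.go, hs, hc', ih]
      · simp [PySem.Chars.split₀.go, hs, hc, ih]
    · simp [PySem.Chars.split₀.go, hs, ih]

theorem pv_flatten_split₀ (s : List Char) :
    (PySem.Chars.split₀ s).flatten = s.filter (fun c => !PySem.Chars.isspace c) := by
  simpa using pv_go s [] []

theorem pv_sum_zero (c : Char) (t : List Char) (h : c ∉ t) :
    (t.map (fun k => if c = k then (1 : Int) else 0)).sum = 0 := by
  induction t with
  | nil => simp
  | cons k r ih =>
    have h1 : c ≠ k := fun e => h (e ▸ List.mem_cons_self)
    have h2 : c ∉ r := fun e => h (List.mem_cons_of_mem _ e)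
    simp [h1, ih h2]

theorem pv_once (c : Char) (l : List Char) (hl : l.Nodup) :
    (l.map (fun k => if c = k then (1 : Int) else 0)).sum = if c ∈ l then 1 else 0 := by
  induction l with
  | nil => simp
  | cons k t ih =>
    rcases List.nodup_cons.mp hl with ⟨hk, ht⟩
    by_cases h : c = k
    · subst h
      simp [pv_sum_zero c t hk]
    · simp [h, ih ht]

theorem pv_hist (p : Char → Bool) (ks : List Char) (hk : ks.Nodup) (m : List Char) :
    ((ks.filter p).map (fun k => (m.count k : Int))).sum
      = ((m.filter (fun x => p x && decide (x ∈ ks))).length : Int) := by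
  induction m with
  | nil => simp
  | cons c r ih =>
    have hcnt : ∀ k : Char, ((c :: r).count k : Int)
        = (r.count k : Int) + (if c = k then (1 : Int) else 0) := by
      intro k
      by_cases h : c = k
      · simp [h, List.count_cons_self]
      · have hb : (c == k) = false := by simpa using h
        simp [h]
    calc ((ks.filter p).map (fun k => ((c :: r).count k : Int))).sum
        = ((ks.filter p).map (fun k => (r.count k : Int) + (if c = k then (1:Int) else 0))).sum := by
          exact congrArg List.sum (List.map_congr_left (fun k _ => hcnt k))
      _ = ((ks.filter p).map (fun k => (r.count k : Int))).sum
            + ((ks.filter p).map (fun k => if c = k then (1:Int) else 0)).sum :=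
          PySem.List.sum_map_add_int _ _ _
      _ = ((r.filter (fun x => p x && decide (x ∈ ks))).length : Int)
            + (if c ∈ ks.filter p then 1 else 0) := by
          rw [ih, pv_once c _ (hk.filter p)]
      _ = (((c :: r).filter (fun x => p x && decide (x ∈ ks))).length : Int) := by
          by_cases hp : p c = true <;> by_cases hm : c ∈ ks <;>
            simp [hp, hm, add_comm]

theorem pv_bside (m : List Char) :
    ((((PySem.Set.ofList m).map (fun k => (k, (m.count k : Int)))).filter
        (fun kv => decide (String.ofList [PySem.Chars.lowerChar kv.1]
                    ∉ (["a","e","i","o","u"] : List String)))).map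
      (fun kv => kv.2)).sum = ((m.filter (fun c => !pvVog c)).length : Int) := by
  rw [List.filter_map, List.map_map]
  have h1 : ((fun kv : Char × Int => decide (String.ofList [PySem.Chars.lowerChar kv.1]
                ∉ (["a","e","i","o","u"] : List String)))
              ∘ (fun k : Char => (k, (m.count k : Int)))) = fun k : Char => !pvVog k := by
    funext k; simp [pvVog, Function.comp]
  have h2 : ((fun kv : Char × Int => kv.2) ∘ (fun k : Char => (k, (m.count k : Int))))
      = fun k : Char => (m.count k : Int) := rfl
  rw [h1, h2, pv_hist (fun k => !pvVog k) (PySem.Set.ofList m) (PySem.Set.nodup_ofList m) m]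
  have h3 : ∀ x ∈ m, (!pvVog x && decide (x ∈ PySem.Set.ofList m)) = (!pvVog x) := by
    intro x hx; simp [(PySem.Set.mem_ofList m x).mpr hx]
  rw [List.filter_congr h3]

-- ===== VERDICT (by name: the statement is the Claim_ definition above) =====
theorem verificar_consoantes_spec : Claim_equal_verificar_consoantes := by
  intro frase _
  show verificar_consoantes frase = verificar_consoantes_alt frase
  unfold verificar_consoantes verificar_consoantes_alt
  simp only
  -- A side: reduce to a count over the flattened split words
  rw [PySem.List.foldl_pyRange_pyGetD' (PySem.Str.split₀ frase) ""
        (fun cont texto2 =>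
          (PySem.List.pyRange 0 (texto2.toList.length : Int)).foldl (fun cont j =>
            if String.ofList [PySem.Chars.lowerChar (PySem.List.pyGetD texto2.toList j ' ')] ∈
               (["a", "e", "i", "o", "u"] : List String)
            then cont else cont + 1) cont) 0 (by norm_num)]
  simp only [Int.toNat_zero, List.drop_zero]
  have hA : ∀ ws : List String, ∀ acc : Int,
      ws.foldl (fun cont texto2 =>
          (PySem.List.pyRange 0 (texto2.toList.length : Int)).foldl (fun cont j =>
            if String.ofList [PySem.Chars.lowerChar (PySem.List.pyGetD texto2.toList j ' ')] ∈
               (["a", "e", "i", "o", "u"] : List String)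
            then cont else cont + 1) cont) acc
        = (ws.map String.toList).foldl
            (fun cont w => cont + ((w.filter (fun c => !pvVog c)).length : Int)) acc := by
    intro ws
    induction ws with
    | nil => intro acc; rfl
    | cons w t ih =>
      intro acc
      simp only [List.foldl_cons, List.map_cons, ih]
      congr 1
      simpa only [pvVog, decide_eq_true_eq] using pv_word w.toList acc
  rw [hA, pv_outer, PySem.Str.split₀_map_toList, pv_flatten_split₀]
  -- B side: the histogram loop is a Counter of the non-whitespace characters
  have hb : frase.toList.foldl (fun d c =>
        if PySem.Chars.isspace c then d else d.insert c (d.getD c 0 + 1)) PySem.Dict.empty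
      = PySem.Dict.counter (frase.toList.filter (fun c => !PySem.Chars.isspace c)) := by
    rw [show (fun (d : PySem.Dict Char Int) c =>
          if PySem.Chars.isspace c then d else d.insert c (d.getD c 0 + 1))
        = (fun (d : PySem.Dict Char Int) c =>
          if !PySem.Chars.isspace c then d.insert c (d.getD c 0 + 1) else d) from by
        funext d c; cases PySem.Chars.isspace c <;> rfl]
    rw [PySem.List.foldl_if_eq_foldl_filter, PySem.Dict.foldl_insert_getD_add_one_eq_counter]
  rw [hb, PySem.Dict.items_counter, pv_bside]
  omega
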